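-- pv_equiv track=rewrite | github.com/FrunzyR/Matrici-pbinfo | 221/main.py | solve
-- ===== SOURCE A (Python) =====
-- def solve(number):
--     matrix = [[0]*number for _ in range(number)]
--     current_number = 2
--     for i in range(number):
--         for j in range(number):
--             if current_number % 2 == 0 and current_number % 3 != 0:
--                 matrix[i][j] = current_number
--                 current_number += 2
--             else:
--                 current_number += 2
--                 if current_number % 2 == 0 and current_number % 3 != 0:
--                     matrix[i][j] = current_number
--                     current_number += 2
--
--     return matrix
-- ===== SOURCE B (Python) =====
-- def solve(number):
--     # cell (i, j) holds the (i*number+j)-th even non-multiple-of-3, in closed form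
--     return [[6 * ((i * number + j) // 2) + 2 + 2 * ((i * number + j) % 2)
--              for j in range(number)]
--             for i in range(number)]
-- ===== Notes on version B (the rewrite author's own statement) =====
-- stated objective: simpler
-- what changed: Replaces the stateful counter with skip-branch logic mutating a prefilled matrix by a nested comprehension computing each cell directly from its linear index via the closed form 6*(idx//2)+2+2*(idx%2).
import Mathlib
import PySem

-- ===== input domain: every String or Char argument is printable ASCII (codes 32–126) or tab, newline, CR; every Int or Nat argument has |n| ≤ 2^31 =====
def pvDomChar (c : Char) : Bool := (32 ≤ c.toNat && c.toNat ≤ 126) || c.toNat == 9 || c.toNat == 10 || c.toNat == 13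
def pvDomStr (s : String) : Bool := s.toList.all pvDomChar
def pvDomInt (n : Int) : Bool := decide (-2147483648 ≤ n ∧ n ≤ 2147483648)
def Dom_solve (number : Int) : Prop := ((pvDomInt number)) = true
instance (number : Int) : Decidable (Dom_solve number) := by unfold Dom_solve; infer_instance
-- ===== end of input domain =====

-- B replaces A's running counter and skip branches by a closed-form per-cell formula (objective: simpler).

-- ===== PORT A =====
-- one cell of A's inner loop: writes matrix[i][j] when the counter is even and not a multiple of 3
def pvCell (st : List (List Int) × Int) (i j : Int) : List (List Int) × Int :=
  let m := st.1
  let c := st.2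
  if PySem.Int.mod c 2 = 0 ∧ PySem.Int.mod c 3 ≠ 0 then
    (PySem.List.pySetD m i (PySem.List.pySetD (PySem.List.pyGetD m i []) j c), c + 2)
  else
    let c2 := c + 2
    if PySem.Int.mod c2 2 = 0 ∧ PySem.Int.mod c2 3 ≠ 0 then
      (PySem.List.pySetD m i (PySem.List.pySetD (PySem.List.pyGetD m i []) j c2), c2 + 2)
    else (m, c2)

def solve (number : Int) : List (List Int) :=
  -- [[0]*number for _ in range(number)]  ([0]*number is List.replicate number.toNat 0, empty for number ≤ 0 — exact)
  let matrix : List (List Int) :=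
    (PySem.List.pyRange 0 number 1).map (fun _ => List.replicate number.toNat (0 : Int))
  let res :=
    (PySem.List.pyRange 0 number 1).foldl (fun st i =>
      (PySem.List.pyRange 0 number 1).foldl (fun st j => pvCell st i j) st)
      (matrix, (2 : Int))
  res.1

-- ===== PORT B =====
-- the value of cell with linear index idx (6*(idx//2) + 2 + 2*(idx%2))
def pvVal (idx : Int) : Int := 6 * PySem.Int.floordiv idx 2 + 2 + 2 * PySem.Int.mod idx 2

def solve_alt (number : Int) : List (List Int) :=
  (PySem.List.pyRange 0 number 1).map (fun i =>
    (PySem.List.pyRange 0 number 1).map (fun j => pvVal (i * number + j)))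

-- ===== PRECONDITION & SPEC =====
def Spec_solve (number : Int) (out : List (List Int)) : Prop := out = solve_alt number
instance (number : Int) (out : List (List Int)) : Decidable (Spec_solve number out) := by unfold Spec_solve; infer_instance

-- ===== CLAIM (what is proved, stated in full; the proofs are below) =====
def Claim_equal_solve : Prop := ∀ (number : Int), Dom_solve number → Spec_solve number (solve number)

-- ===== LEMMAS AND PROOFS =====

-- loop invariant on A's counter c before the cell with linear index idx
def pvInv (idx c : Int) : Prop :=
  PySem.Int.mod c 2 = 0 ∧
    (if PySem.Int.mod c 3 = 0 then c + 2 = pvVal idx else c = pvVal idx)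

-- the row-level action of one cell (only row i of the matrix changes)
def pvRowCell (st : List Int × Int) (j : Int) : List Int × Int :=
  let row := st.1
  let c := st.2
  if PySem.Int.mod c 2 = 0 ∧ PySem.Int.mod c 3 ≠ 0 then
    (PySem.List.pySetD row j c, c + 2)
  else
    let c2 := c + 2
    if PySem.Int.mod c2 2 = 0 ∧ PySem.Int.mod c2 3 ≠ 0 then
      (PySem.List.pySetD row j c2, c2 + 2)
    else (row, c2)

lemma pvRowCell_spec (idx c : Int) (row : List Int) (j : Int) (h : pvInv idx c) :
    pvRowCell (row, c) j = (PySem.List.pySetD row j (pvVal idx), pvVal idx + 2) := by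
  obtain ⟨h1, h2⟩ := h
  have m2 : ∀ a : Int, PySem.Int.mod a 2 = a % 2 := fun a => PySem.Int.mod_eq_emod_of_pos (by norm_num)
  have m3 : ∀ a : Int, PySem.Int.mod a 3 = a % 3 := fun a => PySem.Int.mod_eq_emod_of_pos (by norm_num)
  have fd : PySem.Int.floordiv idx 2 = idx / 2 := PySem.Int.floordiv_eq_ediv_of_pos (by norm_num)
  simp only [pvVal, m2, m3, fd] at h1 h2 ⊢
  simp only [pvRowCell, m2, m3]
  by_cases h3 : c % 3 = 0
  · rw [if_pos h3] at h2
    rw [if_neg (by exact fun hc => hc.2 h3), if_pos (by constructor <;> omega)]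
    rw [h2]
  · rw [if_neg h3] at h2
    rw [if_pos ⟨h1, h3⟩, h2]

lemma pvInv_step (idx : Int) : pvInv (idx + 1) (pvVal idx + 2) := by
  have m2 : ∀ a : Int, PySem.Int.mod a 2 = a % 2 := fun a => PySem.Int.mod_eq_emod_of_pos (by norm_num)
  have m3 : ∀ a : Int, PySem.Int.mod a 3 = a % 3 := fun a => PySem.Int.mod_eq_emod_of_pos (by norm_num)
  have fd : ∀ a : Int, PySem.Int.floordiv a 2 = a / 2 := fun a => PySem.Int.floordiv_eq_ediv_of_pos (by norm_num)
  simp only [pvInv, pvVal, m2, m3, fd]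
  have hpar : idx % 2 = 0 ∨ idx % 2 = 1 := by omega
  refine ⟨by omega, ?_⟩
  rcases hpar with hp | hp
  · rw [if_neg (by omega)]
    omega
  · rw [if_pos (by omega)]
    omega

-- pySetD/pyGetD bookkeeping at one in-range row index
lemma pvSetGetSelf (m : List (List Int)) (i : Int) (h0 : 0 ≤ i) (h1 : i < (m.length : Int)) :
    PySem.List.pySetD m i (PySem.List.pyGetD m i []) = m := by
  rw [PySem.List.pySetD_of_nonneg m _ h0, PySem.List.pyGetD_eq_getElem m [] h0 h1,
    List.set_getElem_self]

lemma pvGetSet (m : List (List Int)) (i : Int) (r : List Int) (h0 : 0 ≤ i)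
    (h1 : i < (m.length : Int)) :
    PySem.List.pyGetD (PySem.List.pySetD m i r) i [] = r := by
  rw [PySem.List.pySetD_of_nonneg m _ h0,
    PySem.List.pyGetD_eq_getElem _ [] h0 (by simpa using h1)]
  rw [List.getElem_set_self]

lemma pvSetSet (m : List (List Int)) (i : Int) (a b : List Int) (h0 : 0 ≤ i) :
    PySem.List.pySetD (PySem.List.pySetD m i a) i b = PySem.List.pySetD m i b := by
  simp [PySem.List.pySetD_of_nonneg _ _ h0, List.set_set]

-- one cell of A factors through the row-level action
lemma pvCell_eq_rowCell (m : List (List Int)) (c : Int) (i j : Int)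
    (hi : 0 ≤ i) (hlen : i < (m.length : Int)) :
    pvCell (m, c) i j =
      (PySem.List.pySetD m i (pvRowCell (PySem.List.pyGetD m i [], c) j).1,
       (pvRowCell (PySem.List.pyGetD m i [], c) j).2) := by
  simp only [pvCell, pvRowCell]
  split_ifs
  · rfl
  · rfl
  · exact Prod.ext (by rw [pvSetGetSelf m i hi hlen]) rfl

-- the whole inner loop factors through rows
lemma inner_eq_rowFold (js : List Int) :
    ∀ (m : List (List Int)) (c : Int) (i : Int), 0 ≤ i → i < (m.length : Int) →
    js.foldl (fun st j => pvCell st i j) (m, c) =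
      (PySem.List.pySetD m i (js.foldl pvRowCell (PySem.List.pyGetD m i [], c)).1,
       (js.foldl pvRowCell (PySem.List.pyGetD m i [], c)).2) := by
  induction js with
  | nil =>
    intro m c i hi hlen
    simpa using (pvSetGetSelf m i hi hlen).symm
  | cons j js ih =>
    intro m c i hi hlen
    simp only [List.foldl_cons]
    rw [pvCell_eq_rowCell m c i j hi hlen]
    set r := pvRowCell (PySem.List.pyGetD m i [], c) j with hr
    rw [ih (PySem.List.pySetD m i r.1) r.2 i hi (by rw [PySem.List.length_pySetD]; exact hlen)]
    rw [pvGetSet m i r.1 hi hlen, pvSetSet m i _ _ hi]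

-- row fold from a zero row writes the closed-form values
lemma rowFold_spec (base n : Int) :
    ∀ (k : Nat), (k : Int) ≤ n → ∀ (c : Int), pvInv base c →
      ((PySem.List.pyRange 0 (k : Int) 1).foldl pvRowCell (List.replicate n.toNat 0, c)).1 =
        (PySem.List.pyRange 0 (k : Int) 1).map (fun j => pvVal (base + j)) ++
          List.replicate (n.toNat - k) 0 ∧
      pvInv (base + k) ((PySem.List.pyRange 0 (k : Int) 1).foldl pvRowCell
        (List.replicate n.toNat 0, c)).2 := by
  intro k
  induction k with
  | zero =>
    intro _ c hc
    simp [PySem.List.pyRange_one_eq_nil (le_refl (0 : Int)), hc]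
  | succ k ih =>
    intro hk c hc
    have hk' : (k : Int) ≤ n := by push_cast at hk ⊢; omega
    have hkn : (k : Int) < n := by push_cast at hk; omega
    obtain ⟨ih1, ih2⟩ := ih hk' c hc
    have hsplit : PySem.List.pyRange 0 ((k + 1 : Nat) : Int) 1 =
        PySem.List.pyRange 0 (k : Int) 1 ++ [(k : Int)] := by
      have : ((k + 1 : Nat) : Int) = (k : Int) + 1 := by push_cast; ring
      rw [this, PySem.List.pyRange_one_succ_right (by positivity)]
    set p := (PySem.List.pyRange 0 (k : Int) 1).foldl pvRowCell (List.replicate n.toNat 0, c)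
      with hp
    have hstep : (PySem.List.pyRange 0 ((k + 1 : Nat) : Int) 1).foldl pvRowCell
        (List.replicate n.toNat 0, c) = pvRowCell p (k : Int) := by
      rw [hsplit, List.foldl_append, hp]
      simp
    have hcell : pvRowCell p (k : Int) =
        (PySem.List.pySetD p.1 (k : Int) (pvVal (base + k)), pvVal (base + k) + 2) := by
      have := pvRowCell_spec (base + k) p.2 p.1 (k : Int) ih2
      simpa using this
    have hlenmap : ((PySem.List.pyRange 0 (k : Int) 1).map (fun j => pvVal (base + j))).length
        = k := by
      simp [PySem.List.length_pyRange_one]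
    have hrep : List.replicate (n.toNat - k) (0 : Int)
        = 0 :: List.replicate (n.toNat - (k + 1)) 0 := by
      have : n.toNat - k = (n.toNat - (k + 1)) + 1 := by omega
      rw [this, List.replicate_succ]
    constructor
    · rw [hstep, hcell]
      rw [PySem.List.pySetD_of_nonneg _ _ (by positivity)]
      have hton : ((k : Int)).toNat = k := by omega
      rw [hton, ih1, List.set_append_right _ _ (by omega), hsplit]
      simp only [hlenmap, Nat.sub_self, hrep, List.set_cons_zero, List.map_append,
        List.map_cons, List.map_nil]
      simp
    · rw [hstep, hcell]
      have := pvInv_step (base + k)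
      have hcast : base + ((k + 1 : Nat) : Int) = base + (k : Int) + 1 := by push_cast; ring
      rw [hcast]
      simpa using this

-- row i of B's matrix
def pvRowB (n i : Int) : List Int :=
  (PySem.List.pyRange 0 n 1).map (fun j => pvVal (i * n + j))

lemma pvInv_init : pvInv 0 2 := by
  refine ⟨by decide, ?_⟩
  rw [if_neg (by decide)]
  decide

-- outer loop invariant
lemma outer_spec (n : Int) (hn : 0 < n) :
    ∀ (k : Nat), (k : Int) ≤ n →
      ((PySem.List.pyRange 0 (k : Int) 1).foldl (fun st i =>
          (PySem.List.pyRange 0 n 1).foldl (fun st j => pvCell st i j) st)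
        ((PySem.List.pyRange 0 n 1).map (fun _ => List.replicate n.toNat (0 : Int)), 2)).1 =
        (PySem.List.pyRange 0 (k : Int) 1).map (fun i => pvRowB n i) ++
          List.replicate (n.toNat - k) (List.replicate n.toNat 0) ∧
      pvInv ((k : Int) * n)
        ((PySem.List.pyRange 0 (k : Int) 1).foldl (fun st i =>
            (PySem.List.pyRange 0 n 1).foldl (fun st j => pvCell st i j) st)
          ((PySem.List.pyRange 0 n 1).map (fun _ => List.replicate n.toNat (0 : Int)), 2)).2 := by
  intro k
  induction k with
  | zero =>
    intro _
    constructor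
    · simp only [Nat.cast_zero, PySem.List.pyRange_one_eq_nil (le_refl (0 : Int))]
      simp [List.map_const', PySem.List.length_pyRange_one]
    · simp only [Nat.cast_zero, PySem.List.pyRange_one_eq_nil (le_refl (0 : Int))]
      simpa using pvInv_init
  | succ k ih =>
    intro hk
    have hk' : (k : Int) ≤ n := by push_cast at hk ⊢; omega
    have hkn : (k : Int) < n := by push_cast at hk; omega
    obtain ⟨ih1, ih2⟩ := ih hk'
    have hsplit : PySem.List.pyRange 0 ((k + 1 : Nat) : Int) 1 =
        PySem.List.pyRange 0 (k : Int) 1 ++ [(k : Int)] := by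
      have : ((k + 1 : Nat) : Int) = (k : Int) + 1 := by push_cast; ring
      rw [this, PySem.List.pyRange_one_succ_right (by positivity)]
    set p := (PySem.List.pyRange 0 (k : Int) 1).foldl (fun st i =>
        (PySem.List.pyRange 0 n 1).foldl (fun st j => pvCell st i j) st)
      ((PySem.List.pyRange 0 n 1).map (fun _ => List.replicate n.toNat (0 : Int)), 2) with hp
    have hstep : (PySem.List.pyRange 0 ((k + 1 : Nat) : Int) 1).foldl (fun st i =>
        (PySem.List.pyRange 0 n 1).foldl (fun st j => pvCell st i j) st)
        ((PySem.List.pyRange 0 n 1).map (fun _ => List.replicate n.toNat (0 : Int)), 2) =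
        (PySem.List.pyRange 0 n 1).foldl (fun st j => pvCell st (k : Int) j) p := by
      rw [hsplit, List.foldl_append, hp]
      simp
    have hlenmap : ((PySem.List.pyRange 0 (k : Int) 1).map (fun i => pvRowB n i)).length = k := by
      simp [PySem.List.length_pyRange_one]
    have hlenp : p.1.length = n.toNat := by
      rw [ih1]
      simp only [List.length_append, hlenmap, List.length_replicate]
      omega
    have htonk : ((k : Int)).toNat = k := by omega
    have hgetp : PySem.List.pyGetD p.1 (k : Int) [] = List.replicate n.toNat (0 : Int) := by
      rw [PySem.List.pyGetD_eq_getElem p.1 [] (by positivity) (by rw [hlenp]; omega)]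
      rw [List.getElem_of_eq ih1]
      rw [List.getElem_append_right (by rw [hlenmap]; omega)]
      simp [hlenmap, htonk]
    have hrep : List.replicate (n.toNat - k) (List.replicate n.toNat (0 : Int))
        = List.replicate n.toNat 0 :: List.replicate (n.toNat - (k + 1)) (List.replicate n.toNat 0) := by
      have : n.toNat - k = (n.toNat - (k + 1)) + 1 := by omega
      rw [this, List.replicate_succ]
    have hinner : (PySem.List.pyRange 0 n 1).foldl (fun st j => pvCell st (k : Int) j) p =
        (PySem.List.pySetD p.1 (k : Int)
          ((PySem.List.pyRange 0 n 1).foldl pvRowCell (List.replicate n.toNat 0, p.2)).1,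
         ((PySem.List.pyRange 0 n 1).foldl pvRowCell (List.replicate n.toNat 0, p.2)).2) := by
      have := inner_eq_rowFold (PySem.List.pyRange 0 n 1) p.1 p.2 (k : Int)
        (by positivity) (by rw [hlenp]; omega)
      rw [hgetp] at this
      simpa using this
    have hrange : PySem.List.pyRange 0 ((n.toNat : Nat) : Int) 1 = PySem.List.pyRange 0 n 1 := by
      rw [Int.toNat_of_nonneg hn.le]
    have hrow := rowFold_spec ((k : Int) * n) n n.toNat
      (by rw [Int.toNat_of_nonneg hn.le]) p.2 ih2
    rw [hrange] at hrow
    obtain ⟨hrow1, hrow2⟩ := hrow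
    constructor
    · rw [hstep, hinner]
      simp only []
      rw [hrow1]
      rw [PySem.List.pySetD_of_nonneg _ _ (by positivity)]
      have hton : ((k : Int)).toNat = k := by omega
      rw [hton, ih1, List.set_append_right _ _ (by omega), hsplit]
      simp only [hlenmap, Nat.sub_self, hrep, List.set_cons_zero, List.map_append,
        List.map_cons, List.map_nil]
      simp [pvRowB]
    · rw [hstep, hinner]
      have hcast : ((k + 1 : Nat) : Int) * n = (k : Int) * n + n := by push_cast; ring
      rw [hcast]
      have hnn : (k : Int) * n + (n.toNat : Int) = (k : Int) * n + n := by
        rw [Int.toNat_of_nonneg hn.le]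
      rw [hnn] at hrow2
      simpa using hrow2

-- ===== VERDICT (by name: the statement is the Claim_ definition above) =====
theorem solve_spec : Claim_equal_solve := by
  intro number _
  unfold Spec_solve
  by_cases hn : 0 < number
  · obtain ⟨h1, _⟩ := outer_spec number hn number.toNat (by rw [Int.toNat_of_nonneg hn.le])
    have hrange : ((number.toNat : Nat) : Int) = number := Int.toNat_of_nonneg hn.le
    rw [hrange] at h1
    simp only [solve, solve_alt]
    rw [h1]
    simp [pvRowB]
  · have hle : number ≤ 0 := by omega
    simp [solve, solve_alt, PySem.List.pyRange_one_eq_nil hle]
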